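-- pv_equiv track=rewrite | github.com/leonyuancode/mycode | gitchat/day1-11/day4/test_1.py | mode_2
-- ===== SOURCE A (Python) =====
-- def mode_2(lst):
--     if not lst:
--         return None
--     ret=[]
--     max_elem=max(lst,key=lambda v:lst.count(v))
--     max_count=lst.count(max_elem)
--     for x in lst:
--         if lst.count(x)==max_count and x not in ret:
--             ret.append(x)
--     return ret
-- ===== SOURCE B (Python) =====
-- def mode_2(lst):
--     if not lst:
--         return None
--     counts = {}
--     for x in lst:
--         counts[x] = counts.get(x, 0) + 1
--     max_count = max(counts.values())
--     return [k for k, v in counts.items() if v == max_count]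
-- ===== Notes on version B (the rewrite author's own statement) =====
-- stated objective: faster
-- what changed: One-pass frequency dict (insertion order = first appearance), then take the max of its values and filter the dict's keys, instead of quadratic repeated lst.count scans plus a dedup-by-membership loop over lst.
import Mathlib
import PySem

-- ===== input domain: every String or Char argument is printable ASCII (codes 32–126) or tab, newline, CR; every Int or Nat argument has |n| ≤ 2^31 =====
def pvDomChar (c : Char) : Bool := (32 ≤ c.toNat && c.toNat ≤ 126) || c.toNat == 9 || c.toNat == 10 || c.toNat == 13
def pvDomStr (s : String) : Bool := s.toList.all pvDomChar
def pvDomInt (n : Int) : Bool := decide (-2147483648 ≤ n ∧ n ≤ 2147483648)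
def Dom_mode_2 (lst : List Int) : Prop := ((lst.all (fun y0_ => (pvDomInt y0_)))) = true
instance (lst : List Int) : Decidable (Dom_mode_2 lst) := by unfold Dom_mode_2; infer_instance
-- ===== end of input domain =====

-- B replaces A's quadratic repeated lst.count scans with a one-pass frequency dict,
-- a max over its values and a filter of its keys (faster).

-- ===== PORT A =====
def mode_2 (lst : List Int) : Option (List Int) :=
  if lst = [] then none
  else
    let ret : List Int := []
    -- max(lst, key=lambda v: lst.count(v)) : first maximal element; lst ≠ [] here, so max? is some
    let max_elem : Int :=
      match PySem.List.max? lst (fun v => (lst.count v : Int)) with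
      | some m => m
      | none => 0
    let max_count : Int := (lst.count max_elem : Int)
    some (lst.foldl
      (fun ret x => if (lst.count x : Int) = max_count ∧ x ∉ ret then ret ++ [x] else ret)
      ret)

-- ===== PORT B =====
def mode_2_alt (lst : List Int) : Option (List Int) :=
  if lst = [] then none
  else
    -- counts = {}; for x in lst: counts[x] = counts.get(x, 0) + 1
    let counts : PySem.Dict Int Int :=
      lst.foldl (fun d x => d.insert x (d.getD x 0 + 1)) PySem.Dict.empty
    -- max(counts.values()) : counts is nonempty since lst ≠ []
    let max_count : Int :=
      match PySem.List.max? counts.values (fun y => y) with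
      | some m => m
      | none => 0
    some ((counts.items.filter (fun p => p.2 = max_count)).map (·.1))

-- ===== PRECONDITION & SPEC =====
def Spec_mode_2 (lst : List Int) (out : Option (List Int)) : Prop := out = mode_2_alt lst
instance (lst : List Int) (out : Option (List Int)) : Decidable (Spec_mode_2 lst out) := by unfold Spec_mode_2; infer_instance

-- ===== CLAIM (what is proved, stated in full; the proofs are below) =====
def Claim_equal_mode_2 : Prop := ∀ (lst : List Int), Dom_mode_2 lst → Spec_mode_2 lst (mode_2 lst)

-- ===== LEMMAS AND PROOFS =====

-- A's dedup-append loop over l, from a state that is 'the p-filter of a seen-set s',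
-- produces the p-filter of the seen-set extended by l.
lemma loopA (p : Int → Prop) [DecidablePred p] :
    ∀ (l : List Int) (s : PySem.Set Int),
      l.foldl (fun ret x => if p x ∧ x ∉ ret then ret ++ [x] else ret)
          (s.filter (fun x => decide (p x)))
        = (l.foldl PySem.Set.add s).filter (fun x => decide (p x)) := by
  intro l
  induction l with
  | nil => intro s; rfl
  | cons x t ih =>
    intro s
    simp only [List.foldl_cons]
    by_cases hx : x ∈ s
    · have h1 : PySem.Set.add s x = s := PySem.Set.add_of_mem hx
      rw [h1]
      by_cases hp : p x
      · have hmem : x ∈ s.filter (fun x => decide (p x)) := List.mem_filter.mpr ⟨hx, by simp [hp]⟩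
        rw [if_neg (by tauto), ih]
      · rw [if_neg (by tauto), ih]
    · have h1 : PySem.Set.add s x = s ++ [x] := PySem.Set.add_of_not_mem hx
      rw [h1]
      by_cases hp : p x
      · have hnm : x ∉ s.filter (fun x => decide (p x)) := fun h => hx (List.mem_filter.mp h).1
        rw [if_pos ⟨hp, hnm⟩]
        have : s.filter (fun x => decide (p x)) ++ [x]
            = (s ++ [x]).filter (fun x => decide (p x)) := by
          simp [List.filter_append, hp]
        rw [this, ih]
      · rw [if_neg (by tauto)]
        have : s.filter (fun x => decide (p x))
            = (s ++ [x]).filter (fun x => decide (p x)) := by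
          simp [List.filter_append, hp]
        rw [this, ih]

-- the two programs compute the same maximal count
lemma max_counts_eq (lst : List Int) (mA mB : Int)
    (hA : PySem.List.max? lst (fun v => (lst.count v : Int)) = some mA)
    (hB : PySem.List.max? (PySem.Dict.counter lst).values (fun y => y) = some mB) :
    (lst.count mA : Int) = mB := by
  have hvals : (PySem.Dict.counter lst).values
      = (PySem.Set.ofList lst).map (fun k => (lst.count k : Int)) := by
    have := PySem.Dict.items_counter (xs := lst)
    simp only [PySem.Dict.values, this, List.map_map]
    rfl
  have hAmem : mA ∈ lst := PySem.List.max?_mem hA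
  have hAmax := PySem.List.max?_isMax hA
  have hBmem : mB ∈ (PySem.Dict.counter lst).values := PySem.List.max?_mem hB
  have hBmax := PySem.List.max?_isMax hB
  rw [hvals] at hBmem hBmax
  -- mB = count k for some k ∈ lst
  obtain ⟨k, hk, hkeq⟩ := List.mem_map.mp hBmem
  have hklst : k ∈ lst := (PySem.List.mem_dedup lst k).mp hk
  -- count mA ∈ the values list
  have hAval : (lst.count mA : Int)
      ∈ (PySem.Set.ofList lst).map (fun k => (lst.count k : Int)) :=
    List.mem_map.mpr ⟨mA, (PySem.List.mem_dedup lst mA).mpr hAmem, rfl⟩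
  have h1 : (lst.count mA : Int) ≤ mB := hBmax _ hAval
  have h2 : mB ≤ (lst.count mA : Int) := by
    rw [← hkeq]; exact hAmax k hklst
  omega

lemma mode_2_eq_alt (lst : List Int) : mode_2 lst = mode_2_alt lst := by
  by_cases hne : lst = []
  · simp [mode_2, mode_2_alt, hne]
  · simp only [mode_2, mode_2_alt, if_neg hne]
    have hcounter : lst.foldl (fun d x => d.insert x (d.getD x 0 + 1)) PySem.Dict.empty
        = PySem.Dict.counter lst := PySem.Dict.foldl_insert_getD_add_one_eq_counter lst
    rw [hcounter]
    -- both max? are some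
    obtain ⟨mA, hA⟩ : ∃ m, PySem.List.max? lst (fun v => (lst.count v : Int)) = some m := by
      cases h : PySem.List.max? lst (fun v => (lst.count v : Int)) with
      | none => exact absurd h (by simpa [PySem.List.max?_eq_none_iff] using hne)
      | some m => exact ⟨m, rfl⟩
    obtain ⟨mB, hB⟩ : ∃ m, PySem.List.max? (PySem.Dict.counter lst).values (fun y => y) = some m := by
      cases h : PySem.List.max? (PySem.Dict.counter lst).values (fun y => y) with
      | none =>
        rw [PySem.List.max?_eq_none_iff] at h
        have : (PySem.Dict.counter lst).values
            = (PySem.Set.ofList lst).map (fun k => (lst.count k : Int)) := by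
          simp only [PySem.Dict.values, PySem.Dict.items_counter, List.map_map]; rfl
        rw [this] at h
        cases lst with
        | nil => exact absurd rfl hne
        | cons y t =>
          have : y ∈ PySem.Set.ofList (y :: t) := (PySem.List.mem_dedup (y :: t) y).mpr (List.mem_cons_self)
          simp [List.map_eq_nil_iff] at h
          simp [h] at this
      | some m => exact ⟨m, rfl⟩
    rw [hA, hB]
    have hmc : (lst.count mA : Int) = mB := max_counts_eq lst mA mB hA hB
    -- A side: the loop is the filter of the seen-set
    have hAside := loopA (fun x => (lst.count x : Int) = mB) lst []
    simp only [List.filter_nil] at hAside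
    -- B side: items of counter
    have hitems : (PySem.Dict.counter lst).items
        = (PySem.Set.ofList lst).map (fun k => (k, (lst.count k : Int))) :=
      PySem.Dict.items_counter lst
    rw [hmc, hitems, hAside]
    have hfold : lst.foldl PySem.Set.add ([] : PySem.Set Int) = PySem.Set.ofList lst :=
      (PySem.Set.ofList_eq_foldl lst).symm
    rw [hfold]
    simp [List.filter_map, List.map_map, Function.comp_def]

-- ===== VERDICT (by name: the statement is the Claim_ definition above) =====
theorem mode_2_spec : Claim_equal_mode_2 := by
  intro lst _
  exact mode_2_eq_alt lst
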